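-- pv_equiv track=rewrite | github.com/AndreasBrommund/Generate-test-strings | generate.py | valid_test
-- ===== SOURCE A (Python) =====
-- def valid_test( sequence ):
--
--     num_zero = 0
--     num_one = 0
--     expect_one = True
--
--     for c in sequence:
--         if c == '1':
--             if expect_one:
--                 num_one += 1
--             else:
--                 return False
--         else:
--             expect_one = False
--             num_zero += 1
--
--
--     return num_zero != num_one
-- ===== SOURCE B (Python) =====
-- def valid_test(sequence):
--     rest = sequence.lstrip('1')          # drop the leading run of ones
--     ones = len(sequence) - len(rest)     # how many leading ones there were
--     if '1' in rest:                      # a one after the first non-one char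
--         return False
--     return len(rest) != ones
-- ===== Notes on version B (the rewrite author's own statement) =====
-- stated objective: faster
-- what changed: Replaces the flag-driven per-character loop maintaining num_zero/num_one/expect_one with whole-string operations: lstrip the leading run of ones, a substring membership test on the remainder, and a length comparison; these run in C, giving a large constant-factor win.
import Mathlib
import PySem

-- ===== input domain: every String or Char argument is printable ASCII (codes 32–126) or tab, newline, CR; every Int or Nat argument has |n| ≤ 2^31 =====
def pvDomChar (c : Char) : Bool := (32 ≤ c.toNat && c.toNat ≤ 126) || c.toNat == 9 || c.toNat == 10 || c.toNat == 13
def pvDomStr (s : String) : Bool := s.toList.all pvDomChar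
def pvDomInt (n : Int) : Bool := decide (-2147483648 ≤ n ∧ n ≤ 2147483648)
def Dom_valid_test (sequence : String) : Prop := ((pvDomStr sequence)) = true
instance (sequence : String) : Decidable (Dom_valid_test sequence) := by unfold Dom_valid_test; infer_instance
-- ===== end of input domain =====

-- B replaces A's flag-driven counting loop with lstrip + a membership check + a length comparison (same O(n), measured constant-factor faster in Python).

-- ===== PORT A =====
-- the for-loop of A with its three state variables; early 'return False' is the 'false' branch
def validLoopA : List Char → Nat → Nat → Bool → Bool
  | [], num_zero, num_one, _ => decide (num_zero ≠ num_one)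
  | c :: rest, num_zero, num_one, expect_one =>
    if c = '1' then
      if expect_one then validLoopA rest num_zero (num_one + 1) expect_one
      else false
    else validLoopA rest (num_zero + 1) num_one false

def valid_test (sequence : String) : Bool :=
  validLoopA sequence.toList 0 0 true

-- ===== PORT B =====
def valid_test_alt (sequence : String) : Bool :=
  let s := sequence.toList
  let rest := s.dropWhile (· == '1')        -- sequence.lstrip('1')
  let ones := s.length - rest.length
  if rest.contains '1' then false
  else decide (rest.length ≠ ones)

-- ===== PRECONDITION & SPEC =====
def Spec_valid_test (sequence : String) (out : Bool) : Prop := out = valid_test_alt sequence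
instance (sequence : String) (out : Bool) : Decidable (Spec_valid_test sequence out) := by unfold Spec_valid_test; infer_instance

-- ===== CLAIM (what is proved, stated in full; the proofs are below) =====
def Claim_equal_valid_test : Prop := ∀ (sequence : String), Dom_valid_test sequence → Spec_valid_test sequence (valid_test sequence)

-- ===== LEMMAS AND PROOFS =====

-- phase 2 of A's loop: after the first non-'1', any '1' aborts, otherwise num_zero counts the tail
theorem validLoopA_false (s : List Char) (nz no : Nat) :
    validLoopA s nz no false =
      (if s.contains '1' then false else decide (nz + s.length ≠ no)) := by
  induction s generalizing nz with
  | nil => simp [validLoopA]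
  | cons c rest ih =>
    by_cases h : c = '1'
    · simp [validLoopA, h]
    · have hb : ('1' == c) = false := by
        simp [beq_iff_eq]; exact fun e => h e.symm
      simp only [validLoopA, if_neg h, ih, List.contains_cons, hb, Bool.false_or,
        List.length_cons]
      split_ifs <;> first | rfl | (simp only [decide_eq_decide]; omega)

-- phase 1 of A's loop: leading ones are counted into num_one, then phase 2 takes over
theorem validLoopA_true (s : List Char) (no : Nat) :
    validLoopA s 0 no true =
      (if (s.dropWhile (· == '1')).contains '1' then false
       else decide ((s.dropWhile (· == '1')).length ≠ (s.length - (s.dropWhile (· == '1')).length) + no)) := by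
  induction s generalizing no with
  | nil => simp [validLoopA]
  | cons c rest ih =>
    by_cases h : c = '1'
    · have hb : (c == '1') = true := by simp [beq_iff_eq, h]
      have hle := List.length_dropWhile_le (fun x => x == '1') rest
      simp only [validLoopA, if_pos h, if_pos rfl, ih, List.dropWhile_cons, hb, if_pos rfl,
        List.length_cons]
      split_ifs <;> first | rfl | (simp only [decide_eq_decide]; omega)
    · have hb : (c == '1') = false := by simp [beq_iff_eq, h]
      have hb' : ('1' == c) = false := by
        simp [beq_iff_eq]; exact fun e => h e.symm
      simp only [validLoopA, if_neg h, validLoopA_false]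
      simp only [List.dropWhile_cons, hb, Bool.false_eq_true, if_false,
        List.contains_cons, hb', Bool.false_or, List.length_cons]
      split_ifs <;> first | rfl | (simp only [decide_eq_decide]; omega)

-- ===== VERDICT (by name: the statement is the Claim_ definition above) =====
theorem valid_test_spec : Claim_equal_valid_test := by
  intro sequence _
  unfold Spec_valid_test valid_test valid_test_alt
  dsimp only
  rw [validLoopA_true]
  split_ifs with hc
  · rfl
  · simp only [decide_eq_decide]; omega
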